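-- pv_equiv track=rewrite | github.com/sekrystal/Jorb-Builder | scripts/automate_task_loop.py | changed_files_are_allowlisted
-- ===== SOURCE A (Python) =====
-- def changed_files_are_allowlisted(changed_files: list[str], allowlist: list[str]) -> tuple[bool, list[str]]:
--     if not changed_files:
--         return True, []
--     disallowed: list[str] = []
--     for changed in changed_files:
--         normalized = changed.strip()
--         allowed = any(
--             normalized == entry
--             or entry == "../jorb-builder/**"
--             or (
--                 entry.startswith("../jorb-builder/")
--                 and (
--                     entry.removeprefix("../jorb-builder/") == "**"
--                     or normalized.startswith(entry.removeprefix("../jorb-builder/").removesuffix("/**"))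
--                 )
--             )
--             or (
--                 entry.endswith("/**")
--                 and normalized.startswith(entry.removesuffix("/**"))
--             )
--             or (entry.endswith("/") and normalized.startswith(entry))
--             for entry in allowlist
--         )
--         if not allowed:
--             disallowed.append(normalized)
--     return len(disallowed) == 0, disallowed
-- ===== SOURCE B (Python) =====
-- def changed_files_are_allowlisted(changed_files: list[str], allowlist: list[str]) -> tuple[bool, list[str]]:
--     if not changed_files:
--         return True, []
--     # One pass over the allowlist: classify every entry once.
--     exact = set()
--     wildcard = False
--     prefixes: list[str] = []
--     for entry in allowlist:
--         exact.add(entry)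
--         if entry == "../jorb-builder/**":
--             wildcard = True
--         elif entry.startswith("../jorb-builder/"):
--             prefixes.append(entry.removeprefix("../jorb-builder/").removesuffix("/**"))
--         if entry.endswith("/**"):
--             prefixes.append(entry.removesuffix("/**"))
--         if entry.endswith("/"):
--             prefixes.append(entry)
--     disallowed: list[str] = []
--     for changed in changed_files:
--         normalized = changed.strip()
--         if not (wildcard or normalized in exact
--                 or any(normalized.startswith(p) for p in prefixes)):
--             disallowed.append(normalized)
--     return len(disallowed) == 0, disallowed
-- ===== Notes on version B (the rewrite author's own statement) =====
-- stated objective: faster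
-- what changed: Instead of re-evaluating the five-way rule disjunction for every (file, entry) pair, B classifies the allowlist once into an exact-match set, a wildcard flag and a list of prefixes (each applicable rule on an entry contributing its own prefix), then checks each changed file against that classification with a hash-set lookup.
import Mathlib
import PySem

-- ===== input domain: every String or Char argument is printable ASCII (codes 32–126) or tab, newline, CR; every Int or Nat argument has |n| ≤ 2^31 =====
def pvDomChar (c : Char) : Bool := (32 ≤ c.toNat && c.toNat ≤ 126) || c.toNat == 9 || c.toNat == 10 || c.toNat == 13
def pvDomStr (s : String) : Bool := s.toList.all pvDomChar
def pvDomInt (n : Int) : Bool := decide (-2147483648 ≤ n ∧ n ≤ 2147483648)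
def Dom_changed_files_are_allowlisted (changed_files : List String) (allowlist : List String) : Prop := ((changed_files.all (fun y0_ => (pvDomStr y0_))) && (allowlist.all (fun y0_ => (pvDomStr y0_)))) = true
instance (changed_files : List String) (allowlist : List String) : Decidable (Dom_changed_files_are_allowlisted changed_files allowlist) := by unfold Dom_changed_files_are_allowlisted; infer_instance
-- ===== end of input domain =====

-- B classifies the allowlist once (exact-match set, wildcard flag, prefix list) instead of
-- re-evaluating the five-way rule disjunction per (file, entry) pair; return value only.

-- shared string helpers: Python str.removeprefix / str.removesuffix (exact)
def pyRemoveprefix (s p : String) : String :=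
  if PySem.Str.startswith s p then String.ofList (s.toList.drop p.toList.length) else s

def pyRemovesuffix (s p : String) : String :=
  if PySem.Str.endswith s p then String.ofList (s.toList.take (s.toList.length - p.toList.length)) else s

-- ===== PORT A =====
def changed_files_are_allowlisted (changed_files : List String) (allowlist : List String) : Bool × List String :=
  if changed_files.isEmpty then (true, [])
  else
    let disallowed := changed_files.foldl (fun disallowed changed =>
      let normalized := PySem.Str.strip changed
      let allowed := allowlist.any (fun entry =>
        normalized == entry
        || entry == "../jorb-builder/**"
        || (PySem.Str.startswith entry "../jorb-builder/"
            && (pyRemoveprefix entry "../jorb-builder/" == "**"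
                || PySem.Str.startswith normalized
                    (pyRemovesuffix (pyRemoveprefix entry "../jorb-builder/") "/**")))
        || (PySem.Str.endswith entry "/**"
            && PySem.Str.startswith normalized (pyRemovesuffix entry "/**"))
        || (PySem.Str.endswith entry "/" && PySem.Str.startswith normalized entry))
      if !allowed then disallowed ++ [normalized] else disallowed) []
    (disallowed.length == 0, disallowed)

-- ===== PORT B =====
-- one classification step per allowlist entry: (exact set, wildcard flag, prefixes)
def pvStepB (st : PySem.Set String × Bool × List String) (entry : String) :
    PySem.Set String × Bool × List String :=
  let exact := PySem.Set.add st.1 entry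
  let wildcard := if entry == "../jorb-builder/**" then true else st.2.1
  let prefixes :=
    if entry == "../jorb-builder/**" then st.2.2
    else if PySem.Str.startswith entry "../jorb-builder/" then
      st.2.2 ++ [pyRemovesuffix (pyRemoveprefix entry "../jorb-builder/") "/**"]
    else st.2.2
  let prefixes := if PySem.Str.endswith entry "/**" then prefixes ++ [pyRemovesuffix entry "/**"] else prefixes
  let prefixes := if PySem.Str.endswith entry "/" then prefixes ++ [entry] else prefixes
  (exact, wildcard, prefixes)

def changed_files_are_allowlisted_alt (changed_files : List String) (allowlist : List String) : Bool × List String :=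
  if changed_files.isEmpty then (true, [])
  else
    let st := allowlist.foldl pvStepB (PySem.Set.empty, false, [])
    let disallowed := changed_files.foldl (fun disallowed changed =>
      let normalized := PySem.Str.strip changed
      if !(st.2.1 || PySem.Set.contains st.1 normalized
            || st.2.2.any (fun p => PySem.Str.startswith normalized p))
      then disallowed ++ [normalized] else disallowed) []
    (disallowed.length == 0, disallowed)

-- ===== PRECONDITION & SPEC =====
def Spec_changed_files_are_allowlisted (changed_files : List String) (allowlist : List String) (out : Bool × List String) : Prop := out = changed_files_are_allowlisted_alt changed_files allowlist
instance (changed_files : List String) (allowlist : List String) (out : Bool × List String) : Decidable (Spec_changed_files_are_allowlisted changed_files allowlist out) := by unfold Spec_changed_files_are_allowlisted; infer_instance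

-- ===== CLAIM (what is proved, stated in full; the proofs are below) =====
def Claim_equal_changed_files_are_allowlisted : Prop := ∀ (changed_files : List String) (allowlist : List String), Dom_changed_files_are_allowlisted changed_files allowlist → Spec_changed_files_are_allowlisted changed_files allowlist (changed_files_are_allowlisted changed_files allowlist)

-- ===== LEMMAS AND PROOFS =====

-- A's per-entry rule, as a named predicate
def pvMatchA (normalized entry : String) : Bool :=
  normalized == entry
  || entry == "../jorb-builder/**"
  || (PySem.Str.startswith entry "../jorb-builder/"
      && (pyRemoveprefix entry "../jorb-builder/" == "**"
          || PySem.Str.startswith normalized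
              (pyRemovesuffix (pyRemoveprefix entry "../jorb-builder/") "/**")))
  || (PySem.Str.endswith entry "/**"
      && PySem.Str.startswith normalized (pyRemovesuffix entry "/**"))
  || (PySem.Str.endswith entry "/" && PySem.Str.startswith normalized entry)

-- B's check against a classification state
def pvCheckB (st : PySem.Set String × Bool × List String) (n : String) : Bool :=
  st.2.1 || PySem.Set.contains st.1 n || st.2.2.any (fun p => PySem.Str.startswith n p)

-- the shared shape of both outer loops, abstracted over the per-file test
def pvCollect (f : String → Bool) (l : List String) : List String :=
  l.foldl (fun d c =>
    let n := PySem.Str.strip c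
    if !(f n) then d ++ [n] else d) []

-- the only entry with jorb-builder remainder "**" is the wildcard entry itself
theorem pv_rem_star {entry : String}
    (h : PySem.Str.startswith entry "../jorb-builder/" = true)
    (h2 : pyRemoveprefix entry "../jorb-builder/" = "**") :
    entry = "../jorb-builder/**" := by
  have h' := h
  rw [PySem.Str.startswith_eq, PySem.Chars.startswith_iff] at h'
  obtain ⟨t, ht⟩ := h'
  unfold pyRemoveprefix at h2
  rw [if_pos h] at h2
  have hdrop : entry.toList.drop ("../jorb-builder/".toList.length) = t := by
    rw [← ht]; exact List.drop_left
  rw [hdrop] at h2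
  have ht2 : t = "**".toList := by
    have := congrArg String.toList h2
    simpa using this
  apply String.toList_inj.mp
  rw [← ht, ht2]; decide

-- one classification step accounts for exactly A's rule on that entry
theorem pv_step (st : PySem.Set String × Bool × List String) (entry n : String) :
    pvCheckB (pvStepB st entry) n = (pvCheckB st n || pvMatchA n entry) := by
  obtain ⟨e, w, p⟩ := st
  by_cases hW : entry = "../jorb-builder/**"
  · subst hW
    simp [pvStepB, pvCheckB, pvMatchA,
          Bool.or_comm, Bool.or_assoc, Bool.or_left_comm]
  · by_cases hsw : PySem.Chars.startswith entry.toList ['.', '.', '/', 'j', 'o', 'r', 'b', '-', 'b', 'u', 'i', 'l', 'd', 'e', 'r', '/'] = true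
    · have hswS : PySem.Str.startswith entry "../jorb-builder/" = true := by
        rw [PySem.Str.startswith_eq]; exact hsw
      have hrem : (pyRemoveprefix entry "../jorb-builder/" == "**") = false := by
        simp only [beq_eq_false_iff_ne, ne_eq]
        intro hc; exact hW (pv_rem_star hswS hc)
      have hW' : (entry == "../jorb-builder/**") = false := by
        simpa using hW
      by_cases h3 : PySem.Chars.endswith entry.toList ['/', '*', '*'] = true <;>
      by_cases h5 : PySem.Chars.endswith entry.toList ['/'] = true <;>
        simp [pvStepB, pvCheckB, pvMatchA, hW', hsw, hrem, h3, h5,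
              beq_eq_decide, List.any_append, Bool.or_comm, Bool.or_assoc, Bool.or_left_comm]
    · by_cases h3 : PySem.Chars.endswith entry.toList ['/', '*', '*'] = true <;>
      by_cases h5 : PySem.Chars.endswith entry.toList ['/'] = true <;>
        simp [pvStepB, pvCheckB, pvMatchA, hW, hsw, h3, h5,
              beq_eq_decide, List.any_append, Bool.or_comm, Bool.or_assoc, Bool.or_left_comm]

theorem pv_fold (l : List String) (st : PySem.Set String × Bool × List String) (n : String) :
    pvCheckB (l.foldl pvStepB st) n = (pvCheckB st n || l.any (pvMatchA n)) := by
  induction l generalizing st with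
  | nil => simp
  | cons e t ih => simp [List.foldl_cons, ih, pv_step, Bool.or_assoc]

theorem pvCollect_congr (f g : String → Bool) (l : List String) (h : ∀ n, f n = g n) :
    pvCollect f l = pvCollect g l := by
  have : f = g := funext h
  rw [this]

theorem pv_A_eq (changed_files allowlist : List String) :
    changed_files_are_allowlisted changed_files allowlist =
      (if changed_files.isEmpty then (true, [])
       else
         let d := pvCollect (fun n => allowlist.any (pvMatchA n)) changed_files
         ((d.length == 0 : Bool), d)) := rfl

theorem pv_B_eq (changed_files allowlist : List String) :
    changed_files_are_allowlisted_alt changed_files allowlist =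
      (if changed_files.isEmpty then (true, [])
       else
         let d := pvCollect
            (fun n => pvCheckB (allowlist.foldl pvStepB (PySem.Set.empty, false, [])) n)
            changed_files
         ((d.length == 0 : Bool), d)) := rfl

-- ===== VERDICT (by name: the statement is the Claim_ definition above) =====
theorem changed_files_are_allowlisted_spec : Claim_equal_changed_files_are_allowlisted := by
  intro changed_files allowlist _
  show _ = _
  rw [pv_A_eq, pv_B_eq]
  by_cases h : changed_files.isEmpty
  · simp [h]
  · simp only [h, Bool.false_eq_true, if_false]
    have hC : pvCollect (fun n => allowlist.any (pvMatchA n)) changed_files =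
        pvCollect (fun n => pvCheckB (allowlist.foldl pvStepB (PySem.Set.empty, false, [])) n)
          changed_files := by
      apply pvCollect_congr
      intro n
      rw [pv_fold]
      simp [pvCheckB, PySem.Set.empty, PySem.Set.contains]
    rw [hC]
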